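-- pv_equiv track=rewrite | github.com/calico-team/calico-sp25 | tournament/submissions/accepted/tournament.py | solve
-- ===== SOURCE A (Python) =====
-- def solve(N: int, C: list, P: list) -> str:
--     """
--     Return a single string of the champion's name
--
--     N: The length of C and P
--     C: List of strings of the competitors
--     P: List of integers of competitor's power
--     """
--     def helper(competitors, powers):
--         if (len(competitors) == 1):
--             return competitors[0]
--         winners = []
--         winnerPowers = []
--         for i in range(len(competitors) // 2):
--             if (powers[2 * i] >= powers[2 * i + 1]):
--                 winners.append(competitors[2 * i])
--             else:
--                 winners.append(competitors[2 * i + 1])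
--             winnerPowers.append(powers[2 * i] + powers[2 * i + 1])
--         if (len(competitors) % 2 == 1):
--             winners.append(competitors[-1])
--             winnerPowers.append(powers[-1])
--         return helper(winners, winnerPowers)
--     return helper(C, P)
-- ===== SOURCE B (Python) =====
-- def solve(N: int, C: list, P: list) -> str:
--     """Iterative tournament over a single list of (name, power) pairs consumed two at a time."""
--     if len(C) == 1:
--         return C[0]
--     k = len(C) // 2 * 2
--     pairs = [(C[i], P[i]) for i in range(k)]
--     if len(C) % 2 == 1:
--         pairs.append((C[-1], P[-1]))
--     while len(pairs) > 1:
--         nxt = []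
--         i = 0
--         while i + 1 < len(pairs):
--             (a, ap), (b, bp) = pairs[i], pairs[i + 1]
--             nxt.append((a if ap >= bp else b, ap + bp))
--             i += 2
--         if i < len(pairs):
--             nxt.append(pairs[i])
--         pairs = nxt
--     return pairs[0][0]
-- ===== Notes on version B (the rewrite author's own statement) =====
-- stated objective: alternative
-- what changed: Replaces the recursive helper over two parallel lists (winners/winnerPowers rebuilt by an indexed for-loop each round) with an iterative while-loop over a single list of (name, power) pairs consumed two at a time.
import Mathlib
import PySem

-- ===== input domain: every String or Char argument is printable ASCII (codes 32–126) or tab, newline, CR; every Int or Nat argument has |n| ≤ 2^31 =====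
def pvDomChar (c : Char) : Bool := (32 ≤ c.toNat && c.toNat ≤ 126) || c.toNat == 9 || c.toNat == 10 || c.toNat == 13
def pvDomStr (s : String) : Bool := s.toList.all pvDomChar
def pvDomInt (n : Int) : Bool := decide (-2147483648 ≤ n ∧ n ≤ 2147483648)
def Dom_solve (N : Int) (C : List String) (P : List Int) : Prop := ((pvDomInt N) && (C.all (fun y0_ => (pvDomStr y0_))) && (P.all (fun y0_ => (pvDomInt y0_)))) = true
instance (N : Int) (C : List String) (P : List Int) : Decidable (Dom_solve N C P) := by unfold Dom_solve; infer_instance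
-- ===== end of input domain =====

-- B replaces A's recursive helper over two parallel lists with an iterative round loop
-- over a single list of (name, power) pairs consumed two at a time (objective: alternative).

-- ===== PORT A =====
-- helper's if/else choosing the winner of match i (powers[2i] >= powers[2i+1] → first wins ties)
def winnerAt (comps : List String) (pows : List Int) (i : Nat) : String :=
  if (PySem.List.pyGet? pows ((2*i : Nat) : Int)).getD 0 ≥ (PySem.List.pyGet? pows ((2*i+1 : Nat) : Int)).getD 0
  then (PySem.List.pyGet? comps ((2*i : Nat) : Int)).getD ""
  else (PySem.List.pyGet? comps ((2*i+1 : Nat) : Int)).getD ""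

-- helper's winnerPowers.append(powers[2i] + powers[2i+1])
def powerAt (pows : List Int) (i : Nat) : Int :=
  (PySem.List.pyGet? pows ((2*i : Nat) : Int)).getD 0 + (PySem.List.pyGet? pows ((2*i+1 : Nat) : Int)).getD 0

-- one round of A's helper: the for-loop over range(len//2) building winners/winnerPowers,
-- then the odd-length bye appending competitors[-1] / powers[-1]
def roundA (comps : List String) (pows : List Int) : List String × List Int :=
  let base := (List.range (comps.length / 2)).foldl
    (fun acc i => (acc.1 ++ [winnerAt comps pows i], acc.2 ++ [powerAt pows i])) ([], [])
  if comps.length % 2 == 1 then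
    (base.1 ++ [(PySem.List.pyGet? comps (-1)).getD ""],
     base.2 ++ [(PySem.List.pyGet? pows (-1)).getD 0])
  else base

-- A's recursive helper; fuel (strictly more than the recursion depth on any input where
-- Python terminates) only makes the recursion total — at fuel 0 (unreached under Pre_) "".
def helperA : Nat → List String → List Int → String
  | 0, _, _ => ""
  | f+1, comps, pows =>
    if comps.length == 1 then (PySem.List.pyGet? comps 0).getD ""
    else helperA f (roundA comps pows).1 (roundA comps pows).2

def solve (N : Int) (C : List String) (P : List Int) : String := helperA (C.length + 1) C P

-- ===== PORT B =====
-- B's initial pair list: (C[i], P[i]) for the 2*(len//2) paired slots, plus the odd bye (C[-1], P[-1])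
def initPairs (C : List String) (P : List Int) : List (String × Int) :=
  (List.range (C.length / 2 * 2)).map
    (fun i => ((PySem.List.pyGet? C ((i : Nat) : Int)).getD "", (PySem.List.pyGet? P ((i : Nat) : Int)).getD 0))
  ++ (if C.length % 2 == 1 then
        [((PySem.List.pyGet? C (-1)).getD "", (PySem.List.pyGet? P (-1)).getD 0)]
      else [])

-- B's inner while: consume the pair list two at a time, keeping a trailing bye unchanged
def pairUp : List (String × Int) → List (String × Int)
  | a :: b :: rest => (if a.2 ≥ b.2 then a.1 else b.1, a.2 + b.2) :: pairUp rest
  | rest => rest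

-- B's outer while (fuel is the totality guard; "" at fuel 0 is unreached under Pre_)
def runB : Nat → List (String × Int) → String
  | 0, _ => ""
  | f+1, pairs => if pairs.length > 1 then runB f (pairUp pairs) else (pairs.headD ("", 0)).1

def solve_alt (N : Int) (C : List String) (P : List Int) : String :=
  if C.length == 1 then (PySem.List.pyGet? C 0).getD ""
  else runB (C.length + 1) (initPairs C P)

-- ===== PRECONDITION & SPEC =====
-- Pre_ is exactly the set of inputs on which Python A returns normally: it excludes only
-- empty C (A's helper recurses forever, RecursionError) and, for two or more competitors,
-- power lists too short for the first round's match indices or its bye lookup (IndexError).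
def Pre_solve (N : Int) (C : List String) (P : List Int) : Prop :=
  C ≠ [] ∧ (C.length = 1 ∨ (C.length / 2 * 2 ≤ P.length ∧ P ≠ []))
instance (N : Int) (C : List String) (P : List Int) : Decidable (Pre_solve N C P) := by unfold Pre_solve; infer_instance
def pvWitness_solve : Int × List String × List Int := (2, ["a", "b"], [3, 1])
def Spec_solve (N : Int) (C : List String) (P : List Int) (out : String) : Prop := out = solve_alt N C P
instance (N : Int) (C : List String) (P : List Int) (out : String) : Decidable (Spec_solve N C P out) := by unfold Spec_solve; infer_instance

-- ===== CLAIM (what is proved, stated in full; the proofs are below) =====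
def Claim_equal_solve : Prop := ∀ (N : Int) (C : List String) (P : List Int), Dom_solve N C P → Pre_solve N C P → Spec_solve N C P (solve N C P)

-- ===== LEMMAS AND PROOFS =====

theorem foldl_pair_append {α β γ : Type} (l : List γ) (f : γ → α) (g : γ → β)
    (a : List α) (b : List β) :
    l.foldl (fun acc i => (acc.1 ++ [f i], acc.2 ++ [g i])) (a, b) = (a ++ l.map f, b ++ l.map g) := by
  induction l generalizing a b with
  | nil => simp
  | cons x xs ih => simp [List.foldl_cons, ih]

theorem pyGet_one {α : Type} (xs : List α) : PySem.List.pyGet? xs 1 = xs[1]? := by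
  simp only [PySem.List.pyGet?, PySem.List.pyIdx?]
  norm_num
  split_ifs with h
  · simp
  · rw [List.getElem?_eq_none (by omega)]
    rfl

theorem roundA_eq (comps : List String) (pows : List Int) :
    roundA comps pows =
      ((List.range (comps.length / 2)).map (winnerAt comps pows)
         ++ (if comps.length % 2 == 1 then [(PySem.List.pyGet? comps (-1)).getD ""] else []),
       (List.range (comps.length / 2)).map (powerAt pows)
         ++ (if comps.length % 2 == 1 then [(PySem.List.pyGet? pows (-1)).getD 0] else [])) := by
  unfold roundA
  rw [foldl_pair_append]
  split <;> simp

theorem winnerAt_shift (c1 c2 : String) (p1 p2 : Int) (cs : List String) (ps : List Int) (i : Nat) :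
    winnerAt (c1 :: c2 :: cs) (p1 :: p2 :: ps) (i + 1) = winnerAt cs ps i := by
  have h2 : 2 * (i + 1) = 2 * i + 1 + 1 := by omega
  simp only [winnerAt]
  rw [h2]
  simp only [PySem.List.pyGet?_natCast, List.getElem?_cons_succ]

theorem powerAt_shift (p1 p2 : Int) (ps : List Int) (i : Nat) :
    powerAt (p1 :: p2 :: ps) (i + 1) = powerAt ps i := by
  have h2 : 2 * (i + 1) = 2 * i + 1 + 1 := by omega
  simp only [powerAt]
  rw [h2]
  simp only [PySem.List.pyGet?_natCast, List.getElem?_cons_succ]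

theorem roundA_cons (c1 c2 : String) (cs : List String) (p1 p2 : Int) (ps : List Int)
    (hbye : cs.length % 2 = 1 → ps ≠ []) :
    roundA (c1 :: c2 :: cs) (p1 :: p2 :: ps) =
      ((if p1 ≥ p2 then c1 else c2) :: (roundA cs ps).1,
       (p1 + p2) :: (roundA cs ps).2) := by
  rw [roundA_eq, roundA_eq]
  have hlen : (c1 :: c2 :: cs).length / 2 = cs.length / 2 + 1 := by simp; omega
  have hmod : ((c1 :: c2 :: cs).length % 2 == 1) = (cs.length % 2 == 1) := by
    simp only [List.length_cons]; congr 1; omega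
  have hw0 : winnerAt (c1 :: c2 :: cs) (p1 :: p2 :: ps) 0 = (if p1 ≥ p2 then c1 else c2) := by
    simp [winnerAt]
  have hp0 : powerAt (p1 :: p2 :: ps) 0 = p1 + p2 := by simp [powerAt]
  have hw : winnerAt (c1 :: c2 :: cs) (p1 :: p2 :: ps) ∘ Nat.succ = winnerAt cs ps :=
    funext fun i => winnerAt_shift c1 c2 p1 p2 cs ps i
  have hp : powerAt (p1 :: p2 :: ps) ∘ Nat.succ = powerAt ps :=
    funext fun i => powerAt_shift p1 p2 ps i
  rw [hlen, hmod, List.range_succ_eq_map]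
  simp only [List.map_cons, List.map_map, hw, hp, hw0, hp0, List.cons_append]
  by_cases hodd : cs.length % 2 = 1
  · cases cs with
    | nil => simp at hodd
    | cons x xs =>
      cases ps with
      | nil => exact absurd rfl (hbye hodd)
      | cons y ys =>
        have hodd' : (xs.length + 1) % 2 = 1 := by simpa using hodd
        simp [hodd', PySem.List.pyGet?_neg_one]
  · have hodd' : ¬ (cs.length % 2 = 1) := hodd
    simp [hodd']

theorem round_len (comps : List String) (pows : List Int) :
    (roundA comps pows).1.length = (roundA comps pows).2.length := by
  rw [roundA_eq]; split <;> simp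

theorem initPairs_length (C : List String) (P : List Int) :
    (initPairs C P).length = C.length := by
  unfold initPairs
  by_cases h : C.length % 2 = 1
  · simp [h]; omega
  · simp [h]; omega

theorem initPairs_cons (c1 c2 : String) (cs : List String) (p1 p2 : Int) (ps : List Int)
    (hbye : cs.length % 2 = 1 → ps ≠ []) :
    initPairs (c1 :: c2 :: cs) (p1 :: p2 :: ps) = (c1, p1) :: (c2, p2) :: initPairs cs ps := by
  unfold initPairs
  have hk : (c1 :: c2 :: cs).length / 2 * 2 = cs.length / 2 * 2 + 1 + 1 := by simp; omega
  have hmod : ((c1 :: c2 :: cs).length % 2 == 1) = (cs.length % 2 == 1) := by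
    simp only [List.length_cons]; congr 1; omega
  have hshift : (fun i => ((PySem.List.pyGet? (c1 :: c2 :: cs) ((i : Nat) : Int)).getD "",
                           (PySem.List.pyGet? (p1 :: p2 :: ps) ((i : Nat) : Int)).getD 0)) ∘
                  (Nat.succ ∘ Nat.succ)
      = (fun i => ((PySem.List.pyGet? cs ((i : Nat) : Int)).getD "",
                   (PySem.List.pyGet? ps ((i : Nat) : Int)).getD 0)) := by
    funext i
    simp only [Function.comp_apply, PySem.List.pyGet?_natCast]
    simp [List.getElem?_cons_succ]
  rw [hk, hmod, List.range_succ_eq_map, List.range_succ_eq_map]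
  simp only [List.map_cons, List.map_map, List.cons_append]
  rw [show (Nat.succ ∘ Nat.succ) = (fun i => Nat.succ (Nat.succ i)) from rfl] at hshift
  simp only [Function.comp_def]
  rw [show (fun i => ((PySem.List.pyGet? (c1 :: c2 :: cs) ((Nat.succ (Nat.succ i) : Nat) : Int)).getD "",
                      (PySem.List.pyGet? (p1 :: p2 :: ps) ((Nat.succ (Nat.succ i) : Nat) : Int)).getD 0))
        = (fun i => ((PySem.List.pyGet? cs ((i : Nat) : Int)).getD "",
                     (PySem.List.pyGet? ps ((i : Nat) : Int)).getD 0)) from hshift]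
  by_cases hodd : cs.length % 2 = 1
  · cases cs with
    | nil => simp at hodd
    | cons x xs =>
      cases ps with
      | nil => exact absurd rfl (hbye hodd)
      | cons y ys =>
        have hodd' : (xs.length + 1) % 2 = 1 := by simpa using hodd
        simp [hodd', PySem.List.pyGet?_neg_one, pyGet_one, List.getLast?_eq_getElem?]
        exact ⟨rfl, rfl⟩
  · have hodd' : ¬ (cs.length % 2 = 1) := hodd
    simp [hodd']

theorem first_round (C : List String) (P : List Int)
    (H1 : C.length / 2 * 2 ≤ P.length) (H2 : C.length % 2 = 1 → P ≠ []) :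
    (roundA C P).1.zip (roundA C P).2 = pairUp (initPairs C P) := by
  match C with
  | [] => simp [roundA_eq, initPairs, pairUp]
  | [c] => simp [roundA_eq, initPairs, pairUp]
  | [c1, c2] =>
    simp [roundA_eq, initPairs, pairUp, List.range_succ, winnerAt, powerAt, pyGet_one,
          PySem.List.pyGet?_zero]
  | [c1, c2, c3] =>
    simp [roundA_eq, initPairs, pairUp, List.range_succ, winnerAt, powerAt,
          PySem.List.pyGet?_neg_one, pyGet_one, PySem.List.pyGet?_zero]
  | c1 :: c2 :: c3 :: c4 :: cs =>
    match P with
    | [] => simp at H1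
    | [p] => simp at H1; omega
    | p1 :: p2 :: ps =>
      have H1' : (c3 :: c4 :: cs).length / 2 * 2 ≤ ps.length := by
        simp only [List.length_cons] at H1 ⊢; omega
      have hpsne : ps.length ≥ 2 := by
        simp only [List.length_cons] at H1; omega
      have H2' : (c3 :: c4 :: cs).length % 2 = 1 → ps ≠ [] := by
        intro _ he; rw [he] at hpsne; simp at hpsne
      have ih := first_round (c3 :: c4 :: cs) ps H1' H2'
      rw [roundA_cons _ _ _ _ _ _ H2', initPairs_cons _ _ _ _ _ _ H2']
      simp [pairUp, ih]
termination_by C.length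

theorem round_zip (comps : List String) (pows : List Int) (h : comps.length = pows.length) :
    (roundA comps pows).1.zip (roundA comps pows).2 = pairUp (comps.zip pows) := by
  match comps, pows with
  | [], [] => simp [roundA_eq, pairUp]
  | [], _ :: _ => simp at h
  | _ :: _, [] => simp at h
  | [c], [p] => simp [roundA_eq, pairUp, PySem.List.pyGet?_neg_one]
  | [c], _ :: _ :: _ => simp at h
  | _ :: _ :: _, [p] => simp at h
  | c1 :: c2 :: cs, p1 :: p2 :: ps =>
    have h' : cs.length = ps.length := by simp at h; omega
    have hbye : cs.length % 2 = 1 → ps ≠ [] := by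
      intro ho he
      rw [he] at h'
      simp only [List.length_nil] at h'
      omega
    have ih := round_zip cs ps h'
    rw [roundA_cons _ _ _ _ _ _ hbye]
    simp [pairUp, ih]
termination_by comps.length

theorem helper_nil (f : Nat) : helperA f [] [] = "" := by
  induction f with
  | zero => rfl
  | succ f ih => simp [helperA, roundA_eq, ih]

theorem main_lemma (f : Nat) : ∀ (comps : List String) (pows : List Int),
    comps.length = pows.length → helperA f comps pows = runB f (comps.zip pows) := by
  induction f with
  | zero => intro comps pows _; rfl
  | succ f ih =>
    intro comps pows h
    match comps, pows with
    | [], [] =>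
      simp [helperA, runB, roundA_eq, helper_nil]
    | [], _ :: _ => simp at h
    | _ :: _, [] => simp at h
    | [c], [p] =>
      simp [helperA, runB, PySem.List.pyGet?, PySem.List.pyIdx?]
    | [c], _ :: _ :: _ => simp at h
    | _ :: _ :: _, [p] => simp at h
    | c1 :: c2 :: cs, p1 :: p2 :: ps =>
      have hr := round_len (c1 :: c2 :: cs) (p1 :: p2 :: ps)
      have step := ih (roundA (c1 :: c2 :: cs) (p1 :: p2 :: ps)).1
                      (roundA (c1 :: c2 :: cs) (p1 :: p2 :: ps)).2 hr
      have hz := round_zip (c1 :: c2 :: cs) (p1 :: p2 :: ps) h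
      rw [show helperA (f+1) (c1 :: c2 :: cs) (p1 :: p2 :: ps)
            = helperA f (roundA (c1 :: c2 :: cs) (p1 :: p2 :: ps)).1 (roundA (c1 :: c2 :: cs) (p1 :: p2 :: ps)).2
          from by simp [helperA]]
      rw [step, hz]
      rw [show runB (f+1) ((c1 :: c2 :: cs).zip (p1 :: p2 :: ps))
            = runB f (pairUp ((c1 :: c2 :: cs).zip (p1 :: p2 :: ps)))
          from by simp [runB]]

-- ===== VERDICT (by name: the statement is the Claim_ definition above) =====
theorem solve_spec : Claim_equal_solve := by
  intro N C P _ hpre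
  obtain ⟨hne, hrest⟩ := hpre
  unfold Spec_solve solve solve_alt
  by_cases h1 : C.length = 1
  · rw [h1]
    simp [helperA, h1]
  · have hlen2 : C.length ≥ 2 := by
      have hp : 0 < C.length := List.length_pos_iff.mpr hne
      omega
    obtain ⟨H1, HPne⟩ : C.length / 2 * 2 ≤ P.length ∧ P ≠ [] := by
      rcases hrest with h | h
      · exact absurd h h1
      · exact h
    have H2 : C.length % 2 = 1 → P ≠ [] := fun _ => HPne
    have hfr := first_round C P H1 H2
    have hr := round_len C P
    have hstep := main_lemma C.length (roundA C P).1 (roundA C P).2 hr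
    have hA : helperA (C.length + 1) C P = helperA C.length (roundA C P).1 (roundA C P).2 := by
      have : (C.length == 1) = false := by simp [h1]
      simp [helperA, this]
    have hB : runB (C.length + 1) (initPairs C P) = runB C.length (pairUp (initPairs C P)) := by
      have : (initPairs C P).length > 1 := by rw [initPairs_length]; omega
      simp [runB, this]
    have hb1 : (C.length == 1) = false := by simp [h1]
    rw [hb1]
    simp only [Bool.false_eq_true, if_false]
    rw [hA, hB, hstep, hfr]
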